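-- pv_equiv track=rewrite | github.com/cute-cirno/LeetCode | Normal/HW-Q4.py | longest_substring_with_one_letter
-- ===== SOURCE A (Python) =====
-- def longest_substring_with_one_letter(s):
--     n = len(s)
--     max_length = -1
--     left = 0
--     letter_count = 0
--     letter_index = -1
--
--     for right in range(n):
--         if s[right].isalpha():
--             letter_count += 1
--             letter_index = right
--
--         while letter_count > 1:
--             if s[left].isalpha():
--                 letter_count -= 1
--             left += 1
--
--         if letter_count == 1:
--             if all(c.isdigit() for i, c in enumerate(s[left:right+1]) if i != letter_index - left):
--                 max_length = max(max_length, right - left + 1)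
--
--     return max_length
-- ===== SOURCE B (Python) =====
-- def longest_substring_with_one_letter(s):
--     # One pass, O(1) work per character: track the last two letter positions and
--     # whether the stretches between / after them consist of digits only.
--     best = -1
--     prev = -1      # index of the second-most-recent letter (-1 if none)
--     last = -1      # index of the most recent letter (-1 if none)
--     gap = True     # s[prev+1:last] is all digits
--     tail = True    # s[last+1:right+1] is all digits
--     for right, c in enumerate(s):
--         if c.isalpha():
--             prev, last, gap, tail = last, right, tail, True
--             if gap:
--                 best = max(best, right - prev)
--         elif c.isdigit():
--             if last >= 0 and gap and tail:
--                 best = max(best, right - prev)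
--         else:
--             tail = False
--     return best
-- ===== Notes on version B (the rewrite author's own statement) =====
-- stated objective: faster
-- what changed: replaced the shrink-window loop plus per-position all()-scan over the slice with a single pass that keeps the last two letter positions and two booleans (digits-only between and after the last letter), so each character is handled in O(1)
import Mathlib
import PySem

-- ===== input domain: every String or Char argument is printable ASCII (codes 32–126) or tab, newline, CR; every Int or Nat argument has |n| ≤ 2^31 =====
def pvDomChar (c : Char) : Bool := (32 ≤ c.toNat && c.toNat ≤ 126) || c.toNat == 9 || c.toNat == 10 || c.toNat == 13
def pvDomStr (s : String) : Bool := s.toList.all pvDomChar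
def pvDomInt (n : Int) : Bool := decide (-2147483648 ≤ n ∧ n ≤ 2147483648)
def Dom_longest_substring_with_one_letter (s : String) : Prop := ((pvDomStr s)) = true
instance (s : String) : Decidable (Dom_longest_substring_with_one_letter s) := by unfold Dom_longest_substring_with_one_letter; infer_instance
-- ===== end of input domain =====

-- B replaces A's O(n) shrink-window/all()-rescan per position by an O(1)-per-character pass
-- tracking the last two letter indices and two digits-only flags (objective: faster).

-- ===== PORT A =====
-- Python's `while letter_count > 1: if s[left].isalpha(): letter_count -= 1; left += 1`.
-- The `left < cs.length` bound only makes the recursion total; it always holds when the loop runs.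
def pvWhileA (cs : List Char) (lc : Int) (left : Nat) : Int × Nat :=
  if h : 1 < lc ∧ left < cs.length then
    pvWhileA cs (if PySem.Chars.isalpha (cs.getD left ' ') then lc - 1 else lc) (left + 1)
  else (lc, left)
termination_by cs.length - left
decreasing_by omega

-- one iteration of A's `for right in range(n)` body; state = (max_length, left, letter_count, letter_index)
def pvStepA (cs : List Char) (st : Int × Nat × Int × Int) (right : Nat) : Int × Nat × Int × Int :=
  match st with
  | (ml, left, lc, li) =>
    let c := cs.getD right ' '   -- s[right]; right < len(s) on every iteration, so exact
    let lcli := if PySem.Chars.isalpha c then (lc + 1, (right : Int)) else (lc, li)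
    let lcleft := pvWhileA cs lcli.1 left
    let ml' :=
      if lcleft.1 = 1 then
        -- all(c.isdigit() for i, c in enumerate(s[left:right+1]) if i != letter_index - left)
        if (PySem.List.enumerate (PySem.List.slice cs (some (lcleft.2 : Int)) (some ((right : Int) + 1))) 0).all
             (fun ic => ic.1 == lcli.2 - (lcleft.2 : Int) || PySem.Chars.isdigit ic.2)
        then max ml ((right : Int) - (lcleft.2 : Int) + 1) else ml
      else ml
    (ml', lcleft.2, lcleft.1, lcli.2)

def longest_substring_with_one_letter (s : String) : Int :=
  ((List.range s.toList.length).foldl (pvStepA s.toList) (-1, 0, 0, -1)).1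

-- ===== PORT B =====
-- one iteration of B's `for right, c in enumerate(s)`; state = (best, prev, last, gap, tail)
def pvStepB (st : Int × Int × Int × Bool × Bool) (p : Int × Char) : Int × Int × Int × Bool × Bool :=
  match st, p with
  | (best, prev, last, gap, tail), (right, c) =>
    if PySem.Chars.isalpha c then
      (if tail then max best (right - last) else best, last, right, tail, true)
    else if PySem.Chars.isdigit c then
      (if 0 ≤ last ∧ gap ∧ tail then max best (right - prev) else best, prev, last, gap, tail)
    else
      (best, prev, last, gap, false)

def longest_substring_with_one_letter_alt (s : String) : Int :=
  ((PySem.List.enumerate s.toList 0).foldl pvStepB (-1, -1, -1, true, true)).1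

-- ===== PRECONDITION & SPEC =====
def Spec_longest_substring_with_one_letter (s : String) (out : Int) : Prop := out = longest_substring_with_one_letter_alt s
instance (s : String) (out : Int) : Decidable (Spec_longest_substring_with_one_letter s out) := by unfold Spec_longest_substring_with_one_letter; infer_instance

-- ===== CLAIM (what is proved, stated in full; the proofs are below) =====
def Claim_equal_longest_substring_with_one_letter : Prop := ∀ (s : String), Dom_longest_substring_with_one_letter s → Spec_longest_substring_with_one_letter s (longest_substring_with_one_letter s)

-- ===== LEMMAS AND PROOFS =====

-- the coupling invariant between A's and B's loop states after processing s[0:r]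
def pvInv (cs : List Char) (r : Nat) : Int × Nat × Int × Int → Int × Int × Int × Bool × Bool → Prop
  | (ml, left, lc, li), (best, prev, last, gap, tail) =>
    ml = best ∧
    (left : Int) = prev + 1 ∧
    li = last ∧
    lc = (if 0 ≤ last then 1 else 0) ∧
    -1 ≤ prev ∧
    -1 ≤ last ∧
    (prev < last ∨ prev = -1) ∧
    last < (r : Int) ∧
    (∀ j : Nat, prev < (j : Int) → (j : Int) < (r : Int) → (j : Int) ≠ last →
        PySem.Chars.isalpha (cs.getD j ' ') = false) ∧
    (0 ≤ last → PySem.Chars.isalpha (cs.getD last.toNat ' ') = true) ∧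
    (gap = true ↔ ∀ j : Nat, prev < (j : Int) → (j : Int) < last →
        PySem.Chars.isdigit (cs.getD j ' ') = true) ∧
    (tail = true ↔ ∀ j : Nat, last < (j : Int) → (j : Int) < (r : Int) →
        PySem.Chars.isdigit (cs.getD j ' ') = true)

lemma pvWhileA_stop (cs : List Char) (lc : Int) (left : Nat) (h : ¬ 1 < lc) :
    pvWhileA cs lc left = (lc, left) := by
  unfold pvWhileA
  simp [h]

lemma pvWhileA_run (cs : List Char) (left m : Nat) (hm : m < cs.length) (hLm : left ≤ m)
    (hmid : ∀ j : Nat, left ≤ j → j < m → PySem.Chars.isalpha (cs.getD j ' ') = false)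
    (halpha : PySem.Chars.isalpha (cs.getD m ' ') = true) :
    pvWhileA cs 2 left = (1, m + 1) := by
  induction hd : m - left generalizing left with
  | zero =>
    have hlm : left = m := by omega
    subst hlm
    rw [pvWhileA.eq_def, dif_pos ⟨by norm_num, hm⟩, halpha]
    norm_num
    rw [pvWhileA_stop _ _ _ (by norm_num)]
  | succ n ih =>
    have hlm : left < m := by omega
    rw [pvWhileA.eq_def, dif_pos ⟨by norm_num, by omega⟩, hmid left le_rfl hlm]
    norm_num
    exact ih (left + 1) (by omega) (fun j hj1 hj2 => hmid j (by omega) hj2) (by omega)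

lemma pv_allcheck_iff (cs : List Char) (L R : Nat) (skip : Int) (hR : R ≤ cs.length) (hLR : L ≤ R) :
    ((PySem.List.enumerate (PySem.List.slice cs (some (L : Int)) (some (R : Int))) 0).all
        (fun ic => ic.1 == skip || PySem.Chars.isdigit ic.2)) = true
    ↔ ∀ j : Nat, L ≤ j → j < R → (j : Int) - (L : Int) ≠ skip →
        PySem.Chars.isdigit (cs.getD j ' ') = true := by
  rw [PySem.List.slice_natCast, List.all_eq_true]
  have hlen : ((cs.drop L).take (R - L)).length = R - L := by
    simp [List.length_take, List.length_drop]; omega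
  constructor
  · intro H j hLj hjR hskip
    have hk : j - L < ((cs.drop L).take (R - L)).length := by omega
    have hmem : ((0 : Int) + (j - L : Nat), ((cs.drop L).take (R - L))[j - L]) ∈
        PySem.List.enumerate ((cs.drop L).take (R - L)) 0 :=
      (PySem.List.mem_enumerate_iff _ _ _).2 ⟨j - L, hk, rfl⟩
    have := H _ hmem
    simp only [Bool.or_eq_true, beq_iff_eq] at this
    have helem : ((cs.drop L).take (R - L))[j - L] = cs.getD j ' ' := by
      have hjlen : j < cs.length := by omega
      rw [List.getElem_take, List.getElem_drop, List.getD_eq_getElem cs ' ' (by omega)]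
      congr 1
      omega
    rw [helem] at this
    rcases this with h' | h'
    · exfalso
      apply hskip
      rw [← h']
      omega
    · exact h'
  · intro H p hp
    obtain ⟨k, hk, rfl⟩ := (PySem.List.mem_enumerate_iff _ _ _).1 hp
    simp only [Bool.or_eq_true, beq_iff_eq]
    by_cases hs : (0 : Int) + (k : Int) = skip
    · exact Or.inl hs
    · right
      have hkRL : k < R - L := by omega
      have helem : ((cs.drop L).take (R - L))[k] = cs.getD (L + k) ' ' := by
        rw [List.getElem_take, List.getElem_drop, List.getD_eq_getElem cs ' ' (by omega)]
      rw [helem]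
      apply H (L + k) (by omega) (by omega)
      push_cast
      omega

lemma pvStep_preserves (cs : List Char) (r : Nat) (hr : r < cs.length)
    (sA : Int × Nat × Int × Int) (sB : Int × Int × Int × Bool × Bool)
    (h : pvInv cs r sA sB) :
    pvInv cs (r + 1) (pvStepA cs sA r) (pvStepB sB ((r : Int), cs.getD r ' ')) := by
  obtain ⟨ml, left, lc, li⟩ := sA
  obtain ⟨best, prev, li, gap, tail⟩ := sB
  obtain ⟨h1, h2, h3, h4, h5, hL, h6, h7, h8, h9, h10, h11⟩ := h
  subst h1; subst h3; subst h4
  by_cases ha : PySem.Chars.isalpha (cs.getD r ' ') = true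
  · -- s[r] is a letter
    by_cases hlast : (0 : Int) ≤ li
    · -- a previous letter exists: the while loop advances left past it
      have hprevlt : prev < li := by rcases h6 with h' | h' <;> omega
      have hlc : (if (0:Int) ≤ li then (1:Int) else 0) = 1 := if_pos hlast
      have hw : pvWhileA cs ((1:Int) + 1) left = (1, li.toNat + 1) :=
        pvWhileA_run cs left li.toNat (by omega) (by omega)
          (fun j hj1 hj2 => h8 j (by omega) (by omega) (by omega)) (h9 hlast)
      simp only [pvStepA, pvStepB, ha, if_true, hlc, hw]
      have hcast : ((li.toNat + 1 : Nat) : Int) = li + 1 := by omega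
      have hiff := pv_allcheck_iff cs (li.toNat + 1) (r + 1)
          ((r : Int) - ((li.toNat + 1 : Nat) : Int)) (by omega) (by omega)
      have hR : ((r + 1 : Nat) : Int) = (r : Int) + 1 := by omega
      rw [hR] at hiff
      have hallE :
          ((PySem.List.enumerate (PySem.List.slice cs (some ((li.toNat + 1 : Nat) : Int))
              (some ((r : Int) + 1))) 0).all
            (fun ic => ic.1 == (r : Int) - ((li.toNat + 1 : Nat) : Int)
              || PySem.Chars.isdigit ic.2)) = tail := by
        rw [Bool.eq_iff_iff]
        refine hiff.trans ?_
        rw [h11]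
        constructor
        · intro H j hj1 hj2
          exact H j (by omega) (by omega) (by omega)
        · intro H j hj1 hj2 hj3
          exact H j (by omega) (by omega)
      rw [hallE]
      refine ⟨?_, by omega, rfl, by simp, by omega, by omega, by left; omega, by omega,
        ?_, ?_, ?_, ?_⟩
      · have : (r : Int) - ((li.toNat + 1 : Nat) : Int) + 1 = (r : Int) - li := by omega
        rw [this]
      · intro j hj1 hj2 hj3
        exact h8 j (by omega) (by omega) (by omega)
      · intro _
        have : ((r : Int)).toNat = r := by omega
        rw [this]; exact ha
      · rw [h11]
      · constructor
        · intro _ j hj1 hj2; omega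
        · intro _; rfl
    · -- first letter of the string so far
      have hlast' : li = -1 := by omega
      have hprev : prev = -1 := by rcases h6 with h' | h' <;> omega
      have hleft : left = 0 := by omega
      subst hlast'; subst hprev; subst hleft
      have hlc : (if (0:Int) ≤ (-1 : Int) then (1:Int) else 0) = 0 := by norm_num
      simp only [pvStepA, pvStepB, ha, if_true, hlc]
      rw [pvWhileA_stop _ _ _ (by norm_num)]
      have hiff := pv_allcheck_iff cs 0 (r + 1) ((r : Int) - ((0 : Nat) : Int))
        (by omega) (by omega)
      have hR : ((r + 1 : Nat) : Int) = (r : Int) + 1 := by omega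
      rw [hR] at hiff
      have hallE :
          ((PySem.List.enumerate (PySem.List.slice cs (some ((0 : Nat) : Int))
              (some ((r : Int) + 1))) 0).all
            (fun ic => ic.1 == (r : Int) - ((0 : Nat) : Int)
              || PySem.Chars.isdigit ic.2)) = tail := by
        rw [Bool.eq_iff_iff]
        refine hiff.trans ?_
        rw [h11]
        constructor
        · intro H j hj1 hj2
          exact H j (by omega) (by omega) (by omega)
        · intro H j hj1 hj2 hj3
          exact H j (by omega) (by omega)
      norm_num only
      norm_num only at hallE
      rw [hallE]
      refine ⟨?_, by omega, rfl, by simp, by omega, by omega, by left; omega, by omega,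
        ?_, ?_, ?_, ?_⟩
      · simp only [if_true]
        have : (r : Int) - 0 + 1 = (r : Int) - (-1 : Int) := by omega
        rw [this]
      · intro j hj1 hj2 hj3
        exact h8 j (by omega) (by omega) (by omega)
      · intro _
        have : ((r : Int)).toNat = r := by omega
        rw [this]; exact ha
      · rw [h11]
      · constructor
        · intro _ j hj1 hj2; omega
        · intro _; rfl
  · -- s[r] is not a letter: letter state unchanged, while loop does not run
    simp only [pvStepA, pvStepB, ha, if_false, Bool.false_eq_true]
    rw [pvWhileA_stop _ _ _ (by split_ifs <;> norm_num)]
    by_cases hlast : (0 : Int) ≤ li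
    · have hlc : (if (0:Int) ≤ li then (1:Int) else 0) = 1 := if_pos hlast
      rw [hlc]
      have hiff := pv_allcheck_iff cs left (r + 1) (li - (left : Int)) (by omega) (by omega)
      have hR : ((r + 1 : Nat) : Int) = (r : Int) + 1 := by omega
      rw [hR] at hiff
      by_cases hd : PySem.Chars.isdigit (cs.getD r ' ') = true
      · -- a digit extends the window
        have hallE :
            ((PySem.List.enumerate (PySem.List.slice cs (some (left : Int))
                (some ((r : Int) + 1))) 0).all
              (fun ic => ic.1 == li - (left : Int)
                || PySem.Chars.isdigit ic.2)) = (gap && tail) := by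
          rw [Bool.eq_iff_iff, Bool.and_eq_true]
          refine hiff.trans ?_
          rw [h10, h11]
          constructor
          · intro H
            constructor
            · intro j hj1 hj2; exact H j (by omega) (by omega) (by omega)
            · intro j hj1 hj2; exact H j (by omega) (by omega) (by omega)
          · rintro ⟨Hg, Ht⟩ j hj1 hj2 hj3
            rcases lt_trichotomy ((j : Int)) li with h' | h' | h'
            · exact Hg j (by omega) h'
            · omega
            · rcases lt_or_eq_of_le (show (j : Int) ≤ (r : Int) by omega) with h'' | h''
              · exact Ht j h' h''
              · have : j = r := by omega
                rw [this]; exact hd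
        rw [hallE, hd]
        have hcond : ((0:Int) ≤ li ∧ gap = true ∧ tail = true) ↔ (gap && tail) = true := by
          simp [hlast]
        refine ⟨?_, h2, rfl, hlc.symm, h5, hL, h6, by omega, ?_, h9, h10, ?_⟩
        · rw [if_congr hcond.symm rfl rfl]
          have : (r : Int) - (left : Int) + 1 = (r : Int) - prev := by omega
          rw [this]
          simp
        · intro j hj1 hj2 hj3
          rcases lt_or_eq_of_le (show j ≤ r by omega) with h'' | h''
          · exact h8 j hj1 (by omega) hj3
          · subst h''; simpa using ha
        · rw [h11]
          constructor
          · intro H j hj1 hj2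
            rcases lt_or_eq_of_le (show (j:Int) ≤ (r:Int) by omega) with h'' | h''
            · exact H j hj1 h''
            · have : j = r := by omega
              rw [this]; exact hd
          · intro H j hj1 hj2
            exact H j hj1 (by omega)
      · -- neither letter nor digit: the window check fails, B clears tail
        have hallE :
            ((PySem.List.enumerate (PySem.List.slice cs (some (left : Int))
                (some ((r : Int) + 1))) 0).all
              (fun ic => ic.1 == li - (left : Int)
                || PySem.Chars.isdigit ic.2)) = false := by
          by_contra hcon
          simp only [Bool.not_eq_false] at hcon
          exact hd (hiff.1 hcon r (by omega) (by omega) (by omega))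
        rw [Bool.not_eq_true] at hd
        rw [hallE, hd]
        simp only [Bool.false_eq_true, if_false]
        refine ⟨rfl, h2, rfl, hlc.symm, h5, hL, h6, by omega, ?_, h9, h10, ?_⟩
        · intro j hj1 hj2 hj3
          rcases lt_or_eq_of_le (show j ≤ r by omega) with h'' | h''
          · exact h8 j hj1 (by omega) hj3
          · subst h''; simpa using ha
        · constructor
          · intro h'; cases h'
          · intro H
            exact absurd (H r (by omega) (by omega)) (by rw [List.getD_eq_getElem?_getD] at hd; simp [hd])
    · -- no letter seen yet
      have hlast' : li = -1 := by omega
      have hlc : (if (0:Int) ≤ li then (1:Int) else 0) = 0 := by rw [if_neg hlast]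
      rw [hlc]
      simp only [show ((0:Int) = 1) = False by simp, if_false]
      by_cases hd : PySem.Chars.isdigit (cs.getD r ' ') = true
      · rw [hd]
        simp only [hlast, false_and, if_false]
        refine ⟨rfl, h2, rfl, hlc.symm, h5, hL, h6, by omega, ?_, h9, h10, ?_⟩
        · intro j hj1 hj2 hj3
          rcases lt_or_eq_of_le (show j ≤ r by omega) with h'' | h''
          · exact h8 j hj1 (by omega) hj3
          · subst h''; simpa using ha
        · rw [h11]
          constructor
          · intro H j hj1 hj2
            rcases lt_or_eq_of_le (show (j:Int) ≤ (r:Int) by omega) with h'' | h''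
            · exact H j hj1 h''
            · have : j = r := by omega
              rw [this]; exact hd
          · intro H j hj1 hj2
            exact H j hj1 (by omega)
      · rw [Bool.not_eq_true] at hd
        rw [hd]
        simp only [Bool.false_eq_true, if_false]
        refine ⟨rfl, h2, rfl, hlc.symm, h5, hL, h6, by omega, ?_, h9, h10, ?_⟩
        · intro j hj1 hj2 hj3
          rcases lt_or_eq_of_le (show j ≤ r by omega) with h'' | h''
          · exact h8 j hj1 (by omega) hj3
          · subst h''; simpa using ha
        · constructor
          · intro h'; cases h'
          · intro H
            exact absurd (H r (by omega) (by omega)) (by rw [List.getD_eq_getElem?_getD] at hd; simp [hd])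

lemma pvInv_zero (cs : List Char) : pvInv cs 0 (-1, 0, 0, -1) (-1, -1, -1, true, true) := by
  refine ⟨rfl, by norm_num, rfl, by norm_num, by norm_num, by norm_num, Or.inr rfl, by norm_num, ?_, ?_, ?_, ?_⟩
  · intro j _ hj _; omega
  · intro h; omega
  · exact ⟨fun _ j h1 h2 => by omega, fun _ => rfl⟩
  · exact ⟨fun _ j h1 h2 => by omega, fun _ => rfl⟩

lemma pvInv_main (cs : List Char) (r : Nat) (hr : r ≤ cs.length) :
    pvInv cs r ((List.range r).foldl (pvStepA cs) (-1, 0, 0, -1))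
      ((PySem.List.enumerate (cs.take r) 0).foldl pvStepB (-1, -1, -1, true, true)) := by
  induction r with
  | zero => simpa using pvInv_zero cs
  | succ k ih =>
    have hk : k < cs.length := by omega
    have htake : cs.take (k + 1) = cs.take k ++ [cs[k]] := by
      rw [List.take_add_one]
      simp [List.getElem?_eq_getElem hk]
    have henum : PySem.List.enumerate (cs.take (k + 1)) 0
        = PySem.List.enumerate (cs.take k) 0 ++ [((k : Int), cs.getD k ' ')] := by
      rw [htake, PySem.List.enumerate_append]
      simp [List.length_take, Nat.min_eq_left (le_of_lt hk), PySem.List.enumerate_cons,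
        List.getD_eq_getElem?_getD, List.getElem?_eq_getElem hk]
    rw [List.range_succ, List.foldl_append, henum, List.foldl_append]
    simpa using pvStep_preserves cs k hk _ _ (ih (by omega))

-- ===== VERDICT (by name: the statement is the Claim_ definition above) =====
theorem longest_substring_with_one_letter_spec : Claim_equal_longest_substring_with_one_letter := by
  intro s _
  unfold Spec_longest_substring_with_one_letter
  unfold longest_substring_with_one_letter longest_substring_with_one_letter_alt
  have h := pvInv_main s.toList s.toList.length (le_refl _)
  rw [List.take_length] at h
  obtain ⟨h1, -⟩ := h
  exact h1
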